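-- pv_equiv track=rewrite | github.com/happysun7080/CodingTest | Programmers/2019_KAKAO_BLIND-후보키.py | isMinimalRelation
-- ===== SOURCE A (Python) =====
-- def isUnique(row):
--     return True if len(row) == len(set(row)) else False
--
-- def isMinimalRelation(row, rows):
--
--     _rows = []
--     for i in row:
--         _rows.append(rows[i])
--
--     new_rows = []
--     for i in range(len(_rows[0])):
--         new_rows.append([x[i] for x in _rows])
--
--     new_row = []
--     for r in new_rows:
--         new_row.append(''.join(r))
--
--     return isUnique(new_row)
-- ===== SOURCE B (Python) =====
-- def isMinimalRelation(row, rows):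
--     sel = [rows[i] for i in row]
--     keys = sorted(''.join(r[j] for r in sel) for j in range(len(sel[0])))
--     for a, b in zip(keys, keys[1:]):
--         if a == b:
--             return False
--     return True
-- ===== Notes on version B (the rewrite author's own statement) =====
-- stated objective: alternative
-- what changed: Builds the same separator-less column key strings, but decides uniqueness by sorting the key list and scanning once for an adjacent equal pair (early exit on the first duplicate) instead of comparing len(list) to len(set(list)).
import Mathlib
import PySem

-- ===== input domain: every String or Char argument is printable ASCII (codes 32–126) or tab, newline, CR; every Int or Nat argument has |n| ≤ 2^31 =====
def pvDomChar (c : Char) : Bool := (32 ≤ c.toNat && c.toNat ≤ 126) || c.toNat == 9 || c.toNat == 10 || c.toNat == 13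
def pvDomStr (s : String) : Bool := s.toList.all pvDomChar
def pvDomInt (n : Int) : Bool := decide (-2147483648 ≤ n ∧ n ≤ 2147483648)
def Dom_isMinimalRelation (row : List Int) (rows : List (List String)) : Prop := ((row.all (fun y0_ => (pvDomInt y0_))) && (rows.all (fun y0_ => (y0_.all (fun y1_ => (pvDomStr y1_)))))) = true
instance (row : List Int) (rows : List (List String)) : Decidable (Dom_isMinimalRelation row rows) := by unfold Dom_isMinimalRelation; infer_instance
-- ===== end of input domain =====

-- B replaces the set-cardinality uniqueness test on the column key strings by sorting the key
-- list and scanning once for an adjacent equal pair (alternative decomposition, not faster).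

-- ===== PORT A =====
def isUnique (row : List String) : Bool :=
  if row.length == (PySem.Set.ofList row).length then true else false

def isMinimalRelation (row : List Int) (rows : List (List String)) : Bool :=
  let _rows := row.foldl (fun acc i => acc ++ [PySem.List.pyGetD rows i []]) []
  let new_rows := (PySem.List.pyRange 0 ((PySem.List.pyGetD _rows 0 []).length : Int) 1).foldl
      (fun acc i => acc ++ [_rows.map (fun x => PySem.List.pyGetD x i "")]) []
  let new_row := new_rows.foldl (fun acc r => acc ++ [PySem.Str.join "" r]) []
  isUnique new_row

-- ===== PORT B =====
-- the 'for a, b in zip(keys, keys[1:])' early-exit scan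
def noAdjDup : List String → Bool
  | a :: b :: t => if a == b then false else noAdjDup (b :: t)
  | _ => true

def isMinimalRelation_alt (row : List Int) (rows : List (List String)) : Bool :=
  let sel := row.map (fun i => PySem.List.pyGetD rows i [])
  let keys := PySem.List.sorted
      ((List.range (PySem.List.pyGetD sel 0 []).length).map
        (fun (j : Nat) => PySem.Str.join "" (sel.map (fun r => PySem.List.pyGetD r ((j : Int)) ""))))
      (fun x => x) false
  noAdjDup keys

-- ===== PRECONDITION & SPEC =====
-- Pre_ excludes exactly the inputs where Python A raises: an empty selection (rows[0] of the
-- empty list) , an index in row outside rows, or a selected row shorter than the first one.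
def Pre_isMinimalRelation (row : List Int) (rows : List (List String)) : Prop :=
  row ≠ [] ∧ (∀ i ∈ row, PySem.Raise.InRange rows.length i) ∧
    (∀ i ∈ row, (PySem.List.pyGetD rows (row.headD 0) []).length ≤ (PySem.List.pyGetD rows i []).length)
instance (row : List Int) (rows : List (List String)) : Decidable (Pre_isMinimalRelation row rows) := by
  unfold Pre_isMinimalRelation; infer_instance

def pvWitness_isMinimalRelation : List Int × List (List String) := ([0, 1], [["a", "b"], ["a", "c"]])

def Spec_isMinimalRelation (row : List Int) (rows : List (List String)) (out : Bool) : Prop := out = isMinimalRelation_alt row rows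
instance (row : List Int) (rows : List (List String)) (out : Bool) : Decidable (Spec_isMinimalRelation row rows out) := by unfold Spec_isMinimalRelation; infer_instance

-- ===== CLAIM (what is proved, stated in full; the proofs are below) =====
def Claim_equal_isMinimalRelation : Prop := ∀ (row : List Int) (rows : List (List String)), Dom_isMinimalRelation row rows → Pre_isMinimalRelation row rows → Spec_isMinimalRelation row rows (isMinimalRelation row rows)

-- ===== LEMMAS AND PROOFS =====

-- set(xs) has as many elements as xs exactly when xs has no duplicates
lemma ofList_sublist {α : Type} [BEq α] [LawfulBEq α] (xs : List α) :
    (PySem.Set.ofList xs).Sublist xs := by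
  induction xs with
  | nil => simp [PySem.Set.ofList]
  | cons x xs ih =>
    rw [PySem.Set.ofList_cons]
    exact List.Sublist.cons₂ x (List.filter_sublist.trans ih)

lemma length_ofList_eq_iff {α : Type} [BEq α] [LawfulBEq α] (xs : List α) :
    (PySem.Set.ofList xs).length = xs.length ↔ xs.Nodup := by
  constructor
  · intro h
    have := (ofList_sublist xs).eq_of_length h
    rw [← this]; exact PySem.Set.nodup_ofList xs
  · intro h; rw [PySem.Set.ofList_eq_self_of_nodup (xs := xs) h]

-- on a ≤-sorted list, no adjacent duplicates ⟺ no duplicates at all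
lemma noAdjDup_eq_nodup (l : List String) (h : l.Pairwise (· ≤ ·)) :
    noAdjDup l = true ↔ l.Nodup := by
  induction l with
  | nil => simp [noAdjDup]
  | cons a t ih =>
    cases t with
    | nil => simp [noAdjDup]
    | cons b t' =>
      rw [List.pairwise_cons] at h
      obtain ⟨hab, ht⟩ := h
      simp only [noAdjDup]
      by_cases hd : a = b
      · subst hd
        simp [List.nodup_cons]
      · simp only [beq_iff_eq, if_neg hd, ih ht, List.nodup_cons]
        constructor
        · intro hn
          refine ⟨?_, hn⟩
          intro hmem
          rcases List.mem_cons.mp hmem with h1 | h2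
          · exact hd h1
          · have hb : b ≤ a := (List.pairwise_cons.mp ht).1 a h2
            exact hd (le_antisymm (hab b (List.mem_cons_self)) hb)
        · intro ⟨_, hn⟩; exact hn

-- the heart: set-cardinality uniqueness = sorted adjacent-duplicate scan
lemma isUnique_eq_noAdjDup_sorted (L : List String) :
    isUnique L = noAdjDup (PySem.List.sorted L (fun x => x) false) := by
  have hnodup : L.Nodup ↔ (PySem.List.sorted L (fun x => x) false).Nodup :=
    (List.Perm.nodup_iff (PySem.List.sorted_perm L (fun x => x) false)).symm
  have hA : isUnique L = true ↔ L.Nodup := by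
    unfold isUnique
    by_cases hc : L.length = (PySem.Set.ofList L).length
    · simp [hc, (length_ofList_eq_iff L).mp hc.symm]
    · have hn : ¬ L.Nodup := fun hn => hc ((length_ofList_eq_iff L).mpr hn).symm
      simp [hc, hn]
  have hB : noAdjDup (PySem.List.sorted L (fun x => x) false) = true ↔ L.Nodup := by
    rw [noAdjDup_eq_nodup _ (PySem.List.sorted_pairwise L (fun x => x)), ← hnodup]
  cases hu : isUnique L with
  | true => exact (hB.mpr (hA.mp hu)).symm
  | false =>
    cases hb : noAdjDup (PySem.List.sorted L (fun x => x) false) with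
    | false => rfl
    | true => rw [hA.mpr (hB.mp hb)] at hu; simp at hu

theorem isMinimalRelation_spec : Claim_equal_isMinimalRelation := by
  intro row rows _ _
  unfold Spec_isMinimalRelation isMinimalRelation isMinimalRelation_alt
  simp only [PySem.List.foldl_append_singleton_eq_map, List.nil_append,
    PySem.List.pyRange_zero_natCast, List.map_map, Function.comp_def]
  exact isUnique_eq_noAdjDup_sorted _
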